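-- pv_equiv track=rewrite | github.com/arn6694/tech_rag | checkmk/scraper.py | get_page_priority
-- ===== SOURCE A (Python) =====
-- def get_page_priority(url):
--     """
--     Determine page priority based on URL content
--     Higher priority pages are scraped first
--     """
--     priority_keywords = {
--         'intro_setup': 10,
--         'install_': 10,
--         'rest_api': 10,
--         'agent_': 9,
--         'update': 9,
--         'upgrade': 9,
--         'troubleshoot': 8,
--         'distributed_': 7,
--         'automation': 7,
--         'api': 7,
--     }
--
--     for keyword, priority in priority_keywords.items():
--         if keyword in url:
--             return priority
--
--     return 5  # Default priority
-- ===== SOURCE B (Python) =====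
-- def get_page_priority(url):
--     """
--     Determine page priority based on URL content
--     Higher priority pages are scraped first
--     """
--     priority_keywords = {
--         'intro_setup': 10,
--         'install_': 10,
--         'rest_api': 10,
--         'agent_': 9,
--         'update': 9,
--         'upgrade': 9,
--         'troubleshoot': 8,
--         'distributed_': 7,
--         'automation': 7,
--         'api': 7,
--     }
--     return max((priority for keyword, priority in priority_keywords.items()
--                 if keyword in url), default=5)
-- ===== Notes on version B (the rewrite author's own statement) =====
-- stated objective: idiomatic
-- what changed: Replaces the first-match early-return loop with a single max() expression over all matching keywords (default 5); equivalent because the priorities are non-increasing in insertion order, which the proof uses.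
import Mathlib
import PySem

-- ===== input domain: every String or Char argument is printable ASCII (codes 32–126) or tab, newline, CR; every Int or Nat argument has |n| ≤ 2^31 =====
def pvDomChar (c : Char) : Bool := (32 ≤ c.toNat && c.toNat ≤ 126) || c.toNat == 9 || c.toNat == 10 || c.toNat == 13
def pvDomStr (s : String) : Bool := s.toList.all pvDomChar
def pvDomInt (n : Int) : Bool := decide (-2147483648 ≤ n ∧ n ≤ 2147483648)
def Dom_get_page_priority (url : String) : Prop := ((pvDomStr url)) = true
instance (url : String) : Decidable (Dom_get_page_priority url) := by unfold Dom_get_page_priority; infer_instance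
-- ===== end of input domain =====

-- B replaces A's first-match early-return loop by a max() over all matching keywords (default 5); idiomatic, equivalent because the table's priorities are non-increasing in insertion order.

-- the priority table (identical contents and order in both programs)
def pvPriorityKeywords : List (String × Int) :=
  [("intro_setup", 10), ("install_", 10), ("rest_api", 10), ("agent_", 9),
   ("update", 9), ("upgrade", 9), ("troubleshoot", 8), ("distributed_", 7),
   ("automation", 7), ("api", 7)]

-- ===== PORT A =====
-- A's loop over the dict items with early return on the first matching keyword
def pvLoopA (items : List (String × Int)) (url : String) : Int :=
  match items with
  | [] => 5
  | (k, p) :: rest => if PySem.Str.isIn k url then p else pvLoopA rest url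

def get_page_priority (url : String) : Int := pvLoopA pvPriorityKeywords url

-- ===== PORT B =====
-- max(generator, default=5): collect the priorities of all matching keywords, then max (5 if none)
def get_page_priority_alt (url : String) : Int :=
  match (pvPriorityKeywords.filter (fun kp => PySem.Str.isIn kp.1 url)).map Prod.snd with
  | [] => 5
  | x :: xs => xs.foldl max x

-- ===== PRECONDITION & SPEC =====
def Spec_get_page_priority (url : String) (out : Int) : Prop := out = get_page_priority_alt url
instance (url : String) (out : Int) : Decidable (Spec_get_page_priority url out) := by unfold Spec_get_page_priority; infer_instance

-- ===== CLAIM (what is proved, stated in full; the proofs are below) =====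
def Claim_equal_get_page_priority : Prop := ∀ (url : String), Dom_get_page_priority url → Spec_get_page_priority url (get_page_priority url)

-- ===== LEMMAS AND PROOFS =====

-- both sides are functions of the ten membership booleans only; generalize them and decide
theorem pv_bool_core : ∀ (b1 b2 b3 b4 b5 b6 b7 b8 b9 b10 : Bool),
    (if b1 then (10:Int) else if b2 then 10 else if b3 then 10 else if b4 then 9
     else if b5 then 9 else if b6 then 9 else if b7 then 8 else if b8 then 7
     else if b9 then 7 else if b10 then 7 else 5)
    = (match (([("intro_setup", (10:Int)), ("install_", 10), ("rest_api", 10), ("agent_", 9),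
        ("update", 9), ("upgrade", 9), ("troubleshoot", 8), ("distributed_", 7),
        ("automation", 7), ("api", 7)]).filter (fun kp =>
          if kp.1 = "intro_setup" then b1 else if kp.1 = "install_" then b2
          else if kp.1 = "rest_api" then b3 else if kp.1 = "agent_" then b4
          else if kp.1 = "update" then b5 else if kp.1 = "upgrade" then b6
          else if kp.1 = "troubleshoot" then b7 else if kp.1 = "distributed_" then b8
          else if kp.1 = "automation" then b9 else b10)).map Prod.snd with
       | [] => 5
       | x :: xs => xs.foldl max x) := by
  decide

-- ===== VERDICT (by name: the statement is the Claim_ definition above) =====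
theorem get_page_priority_spec : Claim_equal_get_page_priority := by
  intro url _
  unfold Spec_get_page_priority get_page_priority get_page_priority_alt
  have h := pv_bool_core (PySem.Str.isIn "intro_setup" url) (PySem.Str.isIn "install_" url)
    (PySem.Str.isIn "rest_api" url) (PySem.Str.isIn "agent_" url)
    (PySem.Str.isIn "update" url) (PySem.Str.isIn "upgrade" url)
    (PySem.Str.isIn "troubleshoot" url) (PySem.Str.isIn "distributed_" url)
    (PySem.Str.isIn "automation" url) (PySem.Str.isIn "api" url)
  simpa [pvPriorityKeywords, pvLoopA, List.filter] using h
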